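-- pv_equiv track=rewrite | github.com/miliar/Code_Jam_Webscraper | Solutions_in_python/Problem_208/Problem3.py | maximal
-- ===== SOURCE A (Python) =====
-- def leq(x, y):
--     return (x[0] >= y[0]) and (x[1] <= y[1]) and (x[2] <= y[2])
--
-- def maximal(lst):
--     maxs = []
--     for x in lst:
--         less = False
--         great = False
--         appgreat = []
--         for i, m in enumerate(maxs):
--             if leq(x, m):
--                 less = True
--                 break
--             elif leq(m, x):
--                 great = True
--                 appgreat.append(i)
--         if great:
--             for i in reversed(appgreat):
--                 del maxs[i]
--         if not less:
--             maxs.append(x)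
--     return maxs
-- ===== SOURCE B (Python) =====
-- def maximal(lst):
--     # Pareto-maximal filter: keep x iff no y in lst strictly dominates it
--     # (leq(x, y) without leq(y, x)) and it is the first element of lst
--     # carrying its (x[0], x[1], x[2]) key.
--     def key(x):
--         return (x[0], x[1], x[2])
--     res = []
--     for x in lst:
--         k = key(x)
--         if any(x[0] >= y[0] and x[1] <= y[1] and x[2] <= y[2] and key(y) != k
--                for y in lst):
--             continue
--         if any(key(z) == k for z in res):
--             continue
--         res.append(x)
--     return res
-- ===== Notes on version B (the rewrite author's own statement) =====
-- stated objective: simpler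
-- what changed: B replaces A's incrementally maintained maxs list with in-place deletions (scan with break, collect indices, delete in reverse) by a one-pass filter: keep x iff no element of lst strictly dominates it and x is the first occurrence of its 3-coordinate key.
-- outside the precondition, e.g. on maximal([[]]): A returns [[]], B raises IndexError
import Mathlib
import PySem

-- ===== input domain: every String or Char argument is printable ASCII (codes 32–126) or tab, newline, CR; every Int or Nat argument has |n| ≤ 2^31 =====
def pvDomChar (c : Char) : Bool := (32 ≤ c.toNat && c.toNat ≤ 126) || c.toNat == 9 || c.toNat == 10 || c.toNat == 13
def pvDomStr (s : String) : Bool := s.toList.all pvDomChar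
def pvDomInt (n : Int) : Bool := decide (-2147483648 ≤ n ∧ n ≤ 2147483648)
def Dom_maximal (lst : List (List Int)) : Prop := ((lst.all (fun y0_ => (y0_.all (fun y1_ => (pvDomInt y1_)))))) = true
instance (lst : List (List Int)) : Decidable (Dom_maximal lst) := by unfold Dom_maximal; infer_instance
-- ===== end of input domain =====

-- B replaces A's incrementally maintained candidate list (scan-with-break, index
-- collection, reversed in-place deletions) by a one-pass filter over the input;
-- objective: simpler.

-- ===== PORT A =====
-- leq(x, y): indices 0,1,2 are in range on Pre_ (every element has length ≥ 3);
-- List.getD i 0 is exact there (Python raises IndexError on shorter elements).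
def leqA (x y : List Int) : Bool :=
  decide (x.getD 0 0 ≥ y.getD 0 0) && decide (x.getD 1 0 ≤ y.getD 1 0) && decide (x.getD 2 0 ≤ y.getD 2 0)

-- inner 'for i, m in enumerate(maxs)' loop: returns (less, great, appgreat); 'break' = early return
def scanA (x : List Int) : List (List Int) → Nat → Bool → List Nat → Bool × Bool × List Nat
  | [], _, great, app => (false, great, app)
  | m :: rest, i, great, app =>
    if leqA x m then (true, great, app)
    else if leqA m x then scanA x rest (i + 1) true (app ++ [i])
    else scanA x rest (i + 1) great app

-- one iteration of the outer 'for x in lst' loop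
def stepA (maxs : List (List Int)) (x : List Int) : List (List Int) :=
  match scanA x maxs 0 false [] with
  | (less, great, appgreat) =>
    let maxs1 := if great then appgreat.reverse.foldl (fun acc i => acc.eraseIdx i) maxs else maxs
    if !less then maxs1 ++ [x] else maxs1

def maximal (lst : List (List Int)) : List (List Int) := lst.foldl stepA []

-- ===== PORT B =====
def keyB (x : List Int) : Int × Int × Int := (x.getD 0 0, x.getD 1 0, x.getD 2 0)

-- 'x[0] >= y[0] and x[1] <= y[1] and x[2] <= y[2] and key(y) != k'
def sdomB (x y : List Int) : Bool :=
  decide (x.getD 0 0 ≥ y.getD 0 0) && decide (x.getD 1 0 ≤ y.getD 1 0) && decide (x.getD 2 0 ≤ y.getD 2 0)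
    && (keyB y ≠ keyB x)

def maximal_alt (lst : List (List Int)) : List (List Int) :=
  lst.foldl (fun res x =>
    if lst.any (fun y => sdomB x y) then res
    else if res.any (fun z => keyB z = keyB x) then res
    else res ++ [x]) []

-- ===== PRECONDITION & SPEC =====
-- Pre_ excludes the inputs containing an element with fewer than three components:
-- Python A raises IndexError on them whenever some comparison is evaluated (it
-- returns only on the degenerate few where no comparison ever runs, such as a
-- single-element input; see the cite in claim.json), while B always evaluates the
-- three coordinates and raises there.
def Pre_maximal (lst : List (List Int)) : Prop := ∀ x ∈ lst, 3 ≤ x.length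
instance (lst : List (List Int)) : Decidable (Pre_maximal lst) := by unfold Pre_maximal; infer_instance

def pvWitness_maximal : List (List Int) := [[1, 2, 3], [0, 5, 5], [1, 2, 3, 9]]

def Spec_maximal (lst : List (List Int)) (out : List (List Int)) : Prop := out = maximal_alt lst
instance (lst : List (List Int)) (out : List (List Int)) : Decidable (Spec_maximal lst out) := by unfold Spec_maximal; infer_instance

-- ===== CLAIM (what is proved, stated in full; the proofs are below) =====
def Claim_equal_maximal : Prop := ∀ (lst : List (List Int)), Dom_maximal lst → Pre_maximal lst → Spec_maximal lst (maximal lst)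

-- ===== LEMMAS AND PROOFS =====

-- y strictly dominates x / x and y are tied (equal on the three compared coordinates)
def sd (y x : List Int) : Bool := leqA x y && !leqA y x
def tie (z x : List Int) : Bool := leqA x z && leqA z x

-- pairwise incomparability invariant of A's maxs list
def Inc (maxs : List (List Int)) : Prop :=
  maxs.Pairwise (fun a b => leqA a b = false ∧ leqA b a = false)

-- reference form of A's loop body (proved equal to stepA under Inc)
def specGo : List (List Int) → List (List Int) → List (List Int)
  | acc, [] => acc
  | acc, x :: rest =>
    if acc.any (fun m => leqA x m) then specGo acc rest
    else specGo (acc.filter (fun m => !leqA m x) ++ [x]) rest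

-- B-shaped loop with an abstract keep/skip condition
def bstep (C : List Int → List (List Int) → Bool) (res : List (List Int)) (x : List Int) : List (List Int) :=
  if C x res then res else res ++ [x]

def Cfull (acc ctx : List (List Int)) (x : List Int) (res : List (List Int)) : Bool :=
  acc.any (fun m => leqA x m) || ctx.any (fun y => sd y x) || res.any (fun z => tie z x)

theorem leqA_trans {a b c : List Int} (h1 : leqA a b = true) (h2 : leqA b c = true) : leqA a c = true := by
  simp [leqA] at *; omega

theorem leqA_refl (a : List Int) : leqA a a = true := by simp [leqA]

theorem tie_key {z x : List Int} : tie z x = true ↔ keyB z = keyB x := by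
  simp [tie, leqA, keyB, Prod.ext_iff]; omega

theorem sd_self (x : List Int) : sd x x = false := by simp [sd, leqA_refl]

theorem sdomB_eq_sd (x y : List Int) : sdomB x y = sd y x := by
  rw [Bool.eq_iff_iff]
  simp [sdomB, sd, leqA, keyB, Prod.ext_iff]
  omega

-- scanA accumulator lemma
theorem scanA_acc (x : List Int) (ms : List (List Int)) : ∀ (i : Nat) (g : Bool) (app : List Nat),
    scanA x ms i g app =
      ((scanA x ms i false []).1, g || (scanA x ms i false []).2.1, app ++ (scanA x ms i false []).2.2) := by
  induction ms with
  | nil => intro i g app; simp [scanA]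
  | cons m tl ih =>
    intro i g app
    cases hxm : leqA x m
    · cases hmx : leqA m x
      · simp only [scanA, hxm, hmx, Bool.false_eq_true, if_false, List.nil_append]
        rw [ih (i + 1) g app, ih (i + 1) false []]
      · simp only [scanA, hxm, hmx, if_true, Bool.false_eq_true, if_false, List.nil_append]
        rw [ih (i + 1) true (app ++ [i]), ih (i + 1) true [i]]
        simp
    · simp [scanA, hxm]

-- breaker case: under Inc, the scan hits a dominator first and collects nothing
theorem scanA_less (x : List Int) (ms : List (List Int)) (i : Nat)
    (hI : ms.Pairwise (fun a b => leqA a b = false ∧ leqA b a = false))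
    (h : ∃ m ∈ ms, leqA x m = true) :
    scanA x ms i false [] = (true, false, []) := by
  induction ms generalizing i with
  | nil => simp at h
  | cons m tl ih =>
    obtain ⟨m', hm', hle⟩ := h
    cases hxm : leqA x m
    · rcases List.mem_cons.mp hm' with rfl | hm'tl
      · rw [hxm] at hle; cases hle
      · cases hmx : leqA m x
        · simp only [scanA, hxm, hmx, Bool.false_eq_true, if_false]
          exact ih (i + 1) (List.Pairwise.of_cons hI) ⟨m', hm'tl, hle⟩
        · exfalso
          have hmm' := leqA_trans hmx hle
          have hp := (List.pairwise_cons.mp hI).1 m' hm'tl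
          rw [hp.1] at hmm'; cases hmm'
    · simp [scanA, hxm]

-- no-breaker case: less = false, great = any, and deleting appgreat (reversed) = filter
theorem eraseIdx_at_length {α : Type} (pre : List α) (a : α) (l : List α) :
    (pre ++ a :: l).eraseIdx pre.length = pre ++ l := by
  induction pre with
  | nil => simp
  | cons b pre ih => simp [ih]

theorem scanA_del (x : List Int) (ms : List (List Int)) : ∀ (pre : List (List Int)),
    (∀ m ∈ ms, leqA x m = false) →
    (scanA x ms pre.length false []).1 = false ∧
    (scanA x ms pre.length false []).2.1 = ms.any (fun m => leqA m x) ∧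
    ((scanA x ms pre.length false []).2.2).reverse.foldl (fun acc i => acc.eraseIdx i) (pre ++ ms)
      = pre ++ ms.filter (fun m => !leqA m x) := by
  induction ms with
  | nil => intro pre h; simp [scanA]
  | cons m tl ih =>
    intro pre h
    have hxm : leqA x m = false := h m (by simp)
    have htl : ∀ m' ∈ tl, leqA x m' = false := fun m' hm' => h m' (by simp [hm'])
    obtain ⟨ih1, ih2, ih3⟩ := ih (pre ++ [m]) htl
    have hlen : (pre ++ [m]).length = pre.length + 1 := by simp
    rw [hlen] at ih1 ih2 ih3
    cases hmx : leqA m x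
    · have hrec : scanA x (m :: tl) pre.length false [] = scanA x tl (pre.length + 1) false [] := by
        simp [scanA, hxm, hmx]
      refine ⟨by rw [hrec]; exact ih1, by rw [hrec]; simp [hmx]; exact ih2, ?_⟩
      rw [hrec]
      calc ((scanA x tl (pre.length + 1) false []).2.2).reverse.foldl (fun acc i => acc.eraseIdx i) (pre ++ m :: tl)
          = ((scanA x tl (pre.length + 1) false []).2.2).reverse.foldl (fun acc i => acc.eraseIdx i) ((pre ++ [m]) ++ tl) := by
            simp
        _ = (pre ++ [m]) ++ tl.filter (fun m => !leqA m x) := ih3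
        _ = pre ++ (m :: tl).filter (fun m => !leqA m x) := by simp [hmx]
    · have hrec : scanA x (m :: tl) pre.length false [] = scanA x tl (pre.length + 1) true [pre.length] := by
        simp [scanA, hxm, hmx]
      rw [hrec, scanA_acc x tl (pre.length + 1) true [pre.length]]
      refine ⟨ih1, by simp [hmx, ih2], ?_⟩
      simp only [List.reverse_append, List.reverse_cons, List.reverse_nil, List.nil_append,
        List.foldl_append]
      rw [show pre ++ m :: tl = (pre ++ [m]) ++ tl by simp]
      rw [ih3]
      simp only [List.foldl_cons, List.foldl_nil]
      rw [show (pre ++ [m]) ++ tl.filter (fun m => !leqA m x) = pre ++ m :: tl.filter (fun m => !leqA m x) by simp]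
      rw [eraseIdx_at_length]
      simp [hmx]

theorem stepA_char (maxs : List (List Int)) (x : List Int) (hI : Inc maxs) :
    stepA maxs x =
      if maxs.any (fun m => leqA x m) then maxs
      else maxs.filter (fun m => !leqA m x) ++ [x] := by
  by_cases h : maxs.any (fun m => leqA x m) = true
  · have hs := scanA_less x maxs 0 hI (by simpa using h)
    simp [stepA, hs, h]
  · have h' : ∀ m ∈ maxs, leqA x m = false := by
      intro m hm
      cases hv : leqA x m
      · rfl
      · exact absurd (List.any_eq_true.mpr ⟨m, hm, hv⟩) h
    obtain ⟨h1, h2, h3⟩ := scanA_del x maxs [] h'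
    simp only [List.length_nil, List.nil_append] at h1 h2 h3
    rcases hscan : scanA x maxs 0 false [] with ⟨less, great, app⟩
    rw [hscan] at h1 h2 h3
    simp only at h1 h2 h3
    subst h1 h2
    simp only [stepA, hscan, Bool.not_false, if_true]
    by_cases hg : maxs.any (fun m => leqA m x) = true
    · simp [hg, h, h3]
    · have hgf : maxs.any (fun m => leqA m x) = false := by
        cases hv : maxs.any (fun m => leqA m x)
        · rfl
        · exact absurd hv hg
      have : maxs.filter (fun m => !leqA m x) = maxs := by
        apply List.filter_eq_self.mpr
        intro m hm
        cases hv : leqA m x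
        · rfl
        · exact absurd (List.any_eq_true.mpr ⟨m, hm, hv⟩) hg
      simp [hgf, h, this]

theorem Inc_step (maxs : List (List Int)) (x : List Int) (hI : Inc maxs)
    (h : maxs.any (fun m => leqA x m) = false) :
    Inc (maxs.filter (fun m => !leqA m x) ++ [x]) := by
  have hall : ∀ m ∈ maxs, leqA x m = false := by
    intro m hm
    simpa using List.any_eq_false.mp h m hm
  unfold Inc
  apply List.pairwise_append.mpr
  refine ⟨List.Pairwise.filter _ hI, List.pairwise_singleton _ _, ?_⟩
  intro a ha b hb
  rw [List.mem_singleton] at hb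
  subst hb
  rw [List.mem_filter] at ha
  constructor
  · simpa using ha.2
  · exact hall a ha.1

theorem foldA_spec (rest : List (List Int)) : ∀ maxs, Inc maxs →
    rest.foldl stepA maxs = specGo maxs rest := by
  induction rest with
  | nil => intro maxs _; simp [specGo]
  | cons x rs ih =>
    intro maxs hI
    rw [List.foldl_cons, stepA_char maxs x hI]
    by_cases h : maxs.any (fun m => leqA x m) = true
    · simp only [h, if_true]
      rw [ih maxs hI]
      simp [specGo, h]
    · have hf : maxs.any (fun m => leqA x m) = false := by
        cases hv : maxs.any (fun m => leqA x m)
        · rfl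
        · exact absurd hv h
      simp only [hf, Bool.false_eq_true, if_false]
      rw [ih _ (Inc_step maxs x hI hf)]
      simp [specGo, hf]

theorem bfold_congr (rest : List (List Int)) (C C' : List Int → List (List Int) → Bool)
    (h : ∀ x ∈ rest, ∀ res, C x res = C' x res) :
    ∀ res, rest.foldl (bstep C) res = rest.foldl (bstep C') res := by
  induction rest with
  | nil => intro res; rfl
  | cons x rs ih =>
    intro res
    have hx : bstep C res x = bstep C' res x := by
      simp [bstep, h x (List.mem_cons_self ..) res]
    rw [List.foldl_cons, List.foldl_cons, hx]
    exact ih (fun z hz => h z (List.mem_cons_of_mem _ hz)) _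

theorem bfold_prefix (rest : List (List Int)) (C : List Int → List (List Int) → Bool) (r0 : List (List Int)) :
    ∀ res, rest.foldl (bstep C) (r0 ++ res) = r0 ++ rest.foldl (bstep (fun x res => C x (r0 ++ res))) res := by
  induction rest with
  | nil => intro res; rfl
  | cons x rs ih =>
    intro res
    rw [List.foldl_cons, List.foldl_cons]
    by_cases hc : C x (r0 ++ res) = true
    · simp only [bstep, hc, if_true]
      exact ih res
    · have hcf : C x (r0 ++ res) = false := by
        cases hv : C x (r0 ++ res)
        · rfl
        · exact absurd hv hc
      simp only [bstep, hcf, Bool.false_eq_true, if_false, List.append_assoc]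
      exact ih (res ++ [x])

theorem sd_leq {y x : List Int} (h : sd y x = true) : leqA x y = true ∧ leqA y x = false := by
  simpa [sd] using h

theorem Inc_pair {acc : List (List Int)} (hI : Inc acc) {a b : List Int}
    (ha : a ∈ acc) (hb : b ∈ acc) (hne : a ≠ b) : leqA a b = false := by
  unfold Inc at hI
  have hsymm : Symmetric (fun (a b : List Int) => leqA a b = false ∧ leqA b a = false) :=
    fun a b h => ⟨h.2, h.1⟩
  exact (List.Pairwise.forall hsymm hI ha hb hne).1

-- in case 1 (x is dominated by a current candidate) x strictly dominates no candidate
theorem sdx_false (acc : List (List Int)) (x m0 : List Int) (hI : Inc acc)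
    (hm0 : m0 ∈ acc) (hle : leqA x m0 = true) : ∀ m ∈ acc, sd x m = false := by
  intro m hm
  cases hv : sd x m
  · rfl
  · exfalso
    obtain ⟨h1, h2⟩ := sd_leq hv
    by_cases hmm : m = m0
    · subst hmm; rw [hle] at h2; cases h2
    · have := leqA_trans h1 hle
      rw [Inc_pair hI hm hm0 hmm] at this; cases this

theorem cong1 (acc rs : List (List Int)) (x m0 : List Int) (hm0 : m0 ∈ acc) (hle : leqA x m0 = true)
    (z : List Int) (res : List (List Int)) :
    Cfull acc (x :: rs) z res = Cfull acc rs z res := by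
  rw [Bool.eq_iff_iff]
  simp only [Cfull, Bool.or_eq_true, List.any_eq_true, List.mem_cons]
  constructor
  · rintro ((h | ⟨y, (heq | hy), hsd⟩) | h)
    · exact Or.inl (Or.inl h)
    · rw [heq] at hsd
      exact Or.inl (Or.inl ⟨m0, hm0, leqA_trans (sd_leq hsd).1 hle⟩)
    · exact Or.inl (Or.inr ⟨y, hy, hsd⟩)
    · exact Or.inr h
  · rintro ((h | ⟨y, hy, hsd⟩) | h)
    · exact Or.inl (Or.inl h)
    · exact Or.inl (Or.inr ⟨y, Or.inr hy, hsd⟩)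
    · exact Or.inr h

theorem cong2a (acc rs : List (List Int)) (x y0 : List Int)
    (hy0 : y0 ∈ rs) (hy0sd : sd y0 x = true)
    (z : List Int) (res : List (List Int)) :
    Cfull (acc.filter (fun m => !leqA m x) ++ [x]) rs z res = Cfull acc (x :: rs) z res := by
  obtain ⟨hxy0, hy0x⟩ := sd_leq hy0sd
  rw [Bool.eq_iff_iff]
  simp only [Cfull, Bool.or_eq_true, List.any_eq_true, List.mem_cons, List.mem_append,
    List.mem_filter, List.not_mem_nil, or_false]
  constructor
  · rintro ((⟨m, (⟨hm, _⟩ | heq), hzm⟩ | h) | h)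
    · exact Or.inl (Or.inl ⟨m, hm, hzm⟩)
    · -- m = x, leqA z x
      rw [heq] at hzm
      by_cases hxz : leqA x z = true
      · -- z tied with x; the dominator y0 of x strictly dominates z too
        have hzy0 : leqA z y0 = true := leqA_trans hzm hxy0
        have hy0z : leqA y0 z = false := by
          cases hv : leqA y0 z
          · rfl
          · rw [leqA_trans hv hzm] at hy0x; cases hy0x
        exact Or.inl (Or.inr ⟨y0, Or.inr hy0, by simp [sd, hzy0, hy0z]⟩)
      · have hxzf : leqA x z = false := by
          cases hv : leqA x z
          · rfl
          · exact absurd hv hxz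
        exact Or.inl (Or.inr ⟨x, Or.inl rfl, by simp [sd, hzm, hxzf]⟩)
    · rcases h with ⟨y, hy, hsd⟩
      exact Or.inl (Or.inr ⟨y, Or.inr hy, hsd⟩)
    · exact Or.inr h
  · rintro ((⟨m, hm, hzm⟩ | ⟨y, (heq | hy), hsd⟩) | h)
    · by_cases hmx : leqA m x = true
      · exact Or.inl (Or.inl ⟨x, Or.inr rfl, leqA_trans hzm hmx⟩)
      · refine Or.inl (Or.inl ⟨m, Or.inl ⟨hm, ?_⟩, hzm⟩)
        cases hv : leqA m x
        · rfl
        · exact absurd hv hmx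
    · rw [heq] at hsd
      exact Or.inl (Or.inl ⟨x, Or.inr rfl, (sd_leq hsd).1⟩)
    · exact Or.inl (Or.inr ⟨y, hy, hsd⟩)
    · exact Or.inr h

theorem cong2b (acc rs : List (List Int)) (x : List Int)
    (z : List Int) (res : List (List Int)) :
    Cfull (acc.filter (fun m => !leqA m x) ++ [x]) rs z res = Cfull acc (x :: rs) z (x :: res) := by
  rw [Bool.eq_iff_iff]
  simp only [Cfull, Bool.or_eq_true, List.any_eq_true, List.mem_cons, List.mem_append,
    List.mem_filter, List.not_mem_nil, or_false]
  constructor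
  · rintro ((⟨m, (⟨hm, _⟩ | heq), hzm⟩ | h) | h)
    · exact Or.inl (Or.inl ⟨m, hm, hzm⟩)
    · rw [heq] at hzm
      by_cases hxz : leqA x z = true
      · exact Or.inr ⟨x, Or.inl rfl, by simp [tie, hzm, hxz]⟩
      · have hxzf : leqA x z = false := by
          cases hv : leqA x z
          · rfl
          · exact absurd hv hxz
        exact Or.inl (Or.inr ⟨x, Or.inl rfl, by simp [sd, hzm, hxzf]⟩)
    · rcases h with ⟨y, hy, hsd⟩
      exact Or.inl (Or.inr ⟨y, Or.inr hy, hsd⟩)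
    · rcases h with ⟨w, hw, ht⟩
      exact Or.inr ⟨w, Or.inr hw, ht⟩
  · rintro ((⟨m, hm, hzm⟩ | ⟨y, (heq | hy), hsd⟩) | ⟨w, (heq2 | hw), ht⟩)
    · by_cases hmx : leqA m x = true
      · exact Or.inl (Or.inl ⟨x, Or.inr rfl, leqA_trans hzm hmx⟩)
      · refine Or.inl (Or.inl ⟨m, Or.inl ⟨hm, ?_⟩, hzm⟩)
        cases hv : leqA m x
        · rfl
        · exact absurd hv hmx
    · rw [heq] at hsd
      exact Or.inl (Or.inl ⟨x, Or.inr rfl, (sd_leq hsd).1⟩)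
    · exact Or.inl (Or.inr ⟨y, hy, hsd⟩)
    · rw [heq2] at ht
      have hzx : leqA z x = true := by
        simp only [tie, Bool.and_eq_true] at ht
        exact ht.1
      exact Or.inl (Or.inl ⟨x, Or.inr rfl, hzx⟩)
    · exact Or.inr ⟨w, hw, ht⟩

-- master lemma: A's reference loop = filter of the old candidates ++ B-shaped pass
theorem specGo_eq (rest : List (List Int)) : ∀ acc, Inc acc →
    specGo acc rest =
      acc.filter (fun m => rest.all (fun y => !sd y m)) ++ rest.foldl (bstep (Cfull acc rest)) [] := by
  induction rest with
  | nil => intro acc _; simp [specGo]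
  | cons x rs ih =>
    intro acc hI
    by_cases hx : acc.any (fun m => leqA x m) = true
    · obtain ⟨m0, hm0, hle0⟩ := List.any_eq_true.mp hx
      have hLHS : specGo acc (x :: rs) = specGo acc rs := by simp [specGo, hx]
      rw [hLHS, ih acc hI]
      have hC : Cfull acc (x :: rs) x [] = true := by simp [Cfull, hx]
      have hfold : (x :: rs).foldl (bstep (Cfull acc (x :: rs))) [] = rs.foldl (bstep (Cfull acc (x :: rs))) [] := by
        rw [List.foldl_cons]; simp [bstep, hC]
      rw [hfold, bfold_congr rs _ _ (fun z _ res => cong1 acc rs x m0 hm0 hle0 z res) []]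
      have hfilt : acc.filter (fun m => (x :: rs).all fun y => !sd y m) = acc.filter (fun m => rs.all fun y => !sd y m) := by
        apply List.filter_congr
        intro m hm
        simp [sdx_false acc x m0 hI hm0 hle0 m hm]
      rw [hfilt]
    · have hxf : acc.any (fun m => leqA x m) = false := by
        cases hv : acc.any (fun m => leqA x m)
        · rfl
        · exact absurd hv hx
      have hnx : ∀ m ∈ acc, leqA x m = false := fun m hm => by
        simpa using List.any_eq_false.mp hxf m hm
      have hLHS : specGo acc (x :: rs) = specGo (acc.filter (fun m => !leqA m x) ++ [x]) rs := by
        simp [specGo, hxf]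
      have hI₂ : Inc (acc.filter (fun m => !leqA m x) ++ [x]) := Inc_step acc x hI hxf
      rw [hLHS, ih _ hI₂]
      by_cases hdom : rs.any (fun y => sd y x) = true
      · obtain ⟨y0, hy0, hy0sd⟩ := List.any_eq_true.mp hdom
        have hC : Cfull acc (x :: rs) x [] = true := by simp [Cfull, hxf, sd_self, hdom]
        have hfold : (x :: rs).foldl (bstep (Cfull acc (x :: rs))) [] = rs.foldl (bstep (Cfull acc (x :: rs))) [] := by
          rw [List.foldl_cons]; simp [bstep, hC]
        rw [hfold, ← bfold_congr rs _ _ (fun z _ res => cong2a acc rs x y0 hy0 hy0sd z res) []]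
        have hxfail : (rs.all fun y => !sd y x) = false := by
          cases hv : rs.all fun y => !sd y x
          · rfl
          · have := List.all_eq_true.mp hv y0 hy0
            rw [hy0sd] at this
            cases this
        have hfilt : ((acc.filter (fun m => !leqA m x) ++ [x]).filter fun m => rs.all fun y => !sd y m)
            = acc.filter (fun m => (x :: rs).all fun y => !sd y m) := by
          rw [List.filter_append, List.filter_filter]
          simp only [List.filter_cons, List.filter_nil, hxfail, Bool.false_eq_true, if_false]
          rw [List.append_nil]
          apply List.filter_congr
          intro m hm
          have h1 : sd x m = leqA m x := by simp [sd, hnx m hm]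
          simp [List.all_cons, h1, Bool.and_comm]
        rw [hfilt]
      · have hdf : rs.any (fun y => sd y x) = false := by
          cases hv : rs.any (fun y => sd y x)
          · rfl
          · exact absurd hv hdom
        have hall : (rs.all fun y => !sd y x) = true := by
          rw [List.all_eq_true]
          intro y hy
          simp [List.any_eq_false.mp hdf y hy]
        have hC : Cfull acc (x :: rs) x [] = false := by simp [Cfull, hxf, sd_self, hdf]
        have hfold : (x :: rs).foldl (bstep (Cfull acc (x :: rs))) [] =
            [x] ++ rs.foldl (bstep (fun z res => Cfull acc (x :: rs) z ([x] ++ res))) [] := by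
          rw [List.foldl_cons]
          simp only [bstep, hC, Bool.false_eq_true, if_false, List.nil_append]
          simpa using bfold_prefix rs (Cfull acc (x :: rs)) [x] []
        rw [hfold]
        have hlam : (fun z res => Cfull acc (x :: rs) z ([x] ++ res))
            = (fun (z : List Int) (res : List (List Int)) => Cfull acc (x :: rs) z (x :: res)) := by
          simp
        rw [hlam,
          bfold_congr rs (fun z res => Cfull acc (x :: rs) z (x :: res))
            (Cfull (acc.filter (fun m => !leqA m x) ++ [x]) rs)
            (fun z _ res => (cong2b acc rs x z res).symm) []]
        have hfilt : ((acc.filter (fun m => !leqA m x) ++ [x]).filter fun m => rs.all fun y => !sd y m)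
            = acc.filter (fun m => (x :: rs).all fun y => !sd y m) ++ [x] := by
          rw [List.filter_append, List.filter_filter]
          simp only [List.filter_cons, List.filter_nil, hall, if_true]
          congr 1
          apply List.filter_congr
          intro m hm
          have h1 : sd x m = leqA m x := by simp [sd, hnx m hm]
          simp [List.all_cons, h1, Bool.and_comm]
        rw [hfilt]
        simp

theorem alt_is_bfold (lst : List (List Int)) :
    maximal_alt lst = lst.foldl (bstep (Cfull [] lst)) [] := by
  have hf : (fun (res : List (List Int)) (x : List Int) =>
        if lst.any (fun y => sdomB x y) then res
        else if res.any (fun z => keyB z = keyB x) then res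
        else res ++ [x]) = bstep (Cfull [] lst) := by
    funext res x
    have h1 : (lst.any fun y => sdomB x y) = lst.any fun y => sd y x := by
      simp only [sdomB_eq_sd]
    have hz : ∀ z : List Int, decide (keyB z = keyB x) = tie z x := by
      intro z; rw [Bool.eq_iff_iff]; simp [tie_key]
    simp only [bstep, Cfull, List.any_nil, Bool.false_or, h1, hz]
    by_cases ha : (lst.any fun y => sd y x) = true
    · simp [ha]
    · by_cases hb : (res.any fun z => tie z x) = true
      · simp [ha, hb]
      · simp [ha, hb]
  simp only [maximal_alt]
  rw [hf]

-- ===== VERDICT (by name: the statement is the Claim_ definition above) =====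
theorem maximal_spec : Claim_equal_maximal := by
  unfold Claim_equal_maximal
  intro lst _ _
  unfold Spec_maximal
  have hInc : Inc [] := by unfold Inc; exact List.Pairwise.nil
  calc maximal lst = specGo [] lst := foldA_spec lst [] hInc
    _ = lst.foldl (bstep (Cfull [] lst)) [] := by
        rw [specGo_eq lst [] hInc]; simp
    _ = maximal_alt lst := (alt_is_bfold lst).symm
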